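-- pv_equiv track=rewrite | github.com/focushyper/ai-photo-metadata-tagger | script.py | truncate_keywords
-- ===== SOURCE A (Python) =====
-- MAX_KEYWORDS_LENGTH = 64  # Maximum length for the Keywords field
--
-- def truncate_keywords(keywords, max_length=MAX_KEYWORDS_LENGTH):
--     truncated_keywords = []
--     current_length = 0
--
--     for keyword in keywords:
--         if current_length + len(keyword) + 2 > max_length:  # +2 for ', ' separator
--             break
--         truncated_keywords.append(keyword)
--         current_length += len(keyword) + 2
--
--     return truncated_keywords
-- ===== SOURCE B (Python) =====
-- from bisect import bisect_right
-- from itertools import accumulate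
--
-- MAX_KEYWORDS_LENGTH = 64  # Maximum length for the Keywords field
--
-- def truncate_keywords(keywords, max_length=MAX_KEYWORDS_LENGTH):
--     # Prefix sums of the costs (len + 2 for the ', ' separator) are strictly
--     # increasing, so the number of keywords that fit is found by binary search.
--     sums = list(accumulate(len(k) + 2 for k in keywords))
--     return keywords[:bisect_right(sums, max_length)]
-- ===== Notes on version B (the rewrite author's own statement) =====
-- stated objective: alternative
-- what changed: Instead of a linear scan with a running accumulator and break, B materializes the prefix sums of the per-keyword costs and binary-searches (bisect_right) the strictly increasing sums for the cutoff index, returning that slice of the keywords.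
import Mathlib
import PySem

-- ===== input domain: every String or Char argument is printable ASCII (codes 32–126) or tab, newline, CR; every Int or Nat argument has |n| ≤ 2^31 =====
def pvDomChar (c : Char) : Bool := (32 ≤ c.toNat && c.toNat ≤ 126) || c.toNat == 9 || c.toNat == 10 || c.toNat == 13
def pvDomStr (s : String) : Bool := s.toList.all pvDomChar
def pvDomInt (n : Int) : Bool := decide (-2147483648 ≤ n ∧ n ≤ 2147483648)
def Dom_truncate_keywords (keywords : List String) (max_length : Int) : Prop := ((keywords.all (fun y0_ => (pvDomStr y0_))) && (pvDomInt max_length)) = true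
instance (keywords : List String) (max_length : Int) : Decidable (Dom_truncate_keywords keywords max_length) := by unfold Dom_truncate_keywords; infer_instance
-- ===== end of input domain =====

-- B replaces A's linear accumulator loop with break by prefix sums + binary search
-- (bisect_right) for the cutoff index, then a slice (alternative algorithm, same cost class).


-- ===== PORT A =====
-- A's loop with break, transcribed as structural recursion over the remaining keywords
def truncA (max_length : Int) (current_length : Int) (ks : List String) : List String :=
  match ks with
  | [] => []
  | k :: rest =>
    if current_length + PySem.Str.len k + 2 > max_length then []
    else k :: truncA max_length (current_length + PySem.Str.len k + 2) rest

def truncate_keywords (keywords : List String) (max_length : Int) : List String :=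
  truncA max_length 0 keywords

-- ===== PORT B =====
-- itertools.accumulate over the per-cost list (running sums, no initial element)
def pyAccumulate (c : Int) (xs : List Int) : List Int :=
  match xs with
  | [] => []
  | x :: r => (c + x) :: pyAccumulate (c + x) r

-- keywords[:i] with i = bisect_right(sums, max_length) : i is a nonnegative in-range
-- index, so the slice is exactly List.take
def truncate_keywords_alt (keywords : List String) (max_length : Int) : List String :=
  let sums := pyAccumulate 0 (keywords.map (fun k => PySem.Str.len k + 2))
  keywords.take (PySem.List.bisectRight sums max_length)

-- ===== PRECONDITION & SPEC =====
def Spec_truncate_keywords (keywords : List String) (max_length : Int) (out : List String) : Prop := out = truncate_keywords_alt keywords max_length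
instance (keywords : List String) (max_length : Int) (out : List String) : Decidable (Spec_truncate_keywords keywords max_length out) := by unfold Spec_truncate_keywords; infer_instance

-- ===== CLAIM (what is proved, stated in full; the proofs are below) =====
def Claim_equal_truncate_keywords : Prop := ∀ (keywords : List String) (max_length : Int), Dom_truncate_keywords keywords max_length → Spec_truncate_keywords keywords max_length (truncate_keywords keywords max_length)

-- ===== LEMMAS AND PROOFS =====

theorem length_pyAccumulate (c : Int) (xs : List Int) : (pyAccumulate c xs).length = xs.length := by
  induction xs generalizing c with
  | nil => rfl
  | cons x r ih => simp [pyAccumulate, ih]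

theorem le_of_mem_pyAccumulate (c : Int) (xs : List Int) (h0 : ∀ x ∈ xs, 0 ≤ x) :
    ∀ y ∈ pyAccumulate c xs, c ≤ y := by
  induction xs generalizing c with
  | nil => simp [pyAccumulate]
  | cons x r ih =>
    intro y hy
    simp only [pyAccumulate, List.mem_cons] at hy
    have hx : 0 ≤ x := h0 x (by simp)
    rcases hy with rfl | hy
    · omega
    · have := ih (c + x) (fun z hz => h0 z (by simp [hz])) y hy
      omega

theorem pairwise_pyAccumulate (c : Int) (xs : List Int) (h0 : ∀ x ∈ xs, 0 ≤ x) :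
    (pyAccumulate c xs).Pairwise (· ≤ ·) := by
  induction xs generalizing c with
  | nil => simp [pyAccumulate]
  | cons x r ih =>
    refine List.pairwise_cons.2 ⟨?_, ih (c + x) (fun z hz => h0 z (by simp [hz]))⟩
    exact le_of_mem_pyAccumulate (c + x) r (fun z hz => h0 z (by simp [hz]))

-- a cutoff index satisfying bisect_right's bracketing turns A's loop into List.take
theorem truncA_eq_take (M : Int) (ks : List String) (c : Int) (r : Nat)
    (hr : r ≤ ks.length)
    (hlo : ∀ (j : Nat) (hj : j < ks.length), j < r →
      (pyAccumulate c (ks.map (fun k => PySem.Str.len k + 2)))[j]'(by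
        rw [length_pyAccumulate, List.length_map]; exact hj) ≤ M)
    (hhi : ∀ (j : Nat) (hj : j < ks.length), r ≤ j →
      M < (pyAccumulate c (ks.map (fun k => PySem.Str.len k + 2)))[j]'(by
        rw [length_pyAccumulate, List.length_map]; exact hj)) :
    truncA M c ks = ks.take r := by
  induction ks generalizing c r with
  | nil => simp [truncA]
  | cons k rest ih =>
    simp only [List.map_cons, pyAccumulate] at hlo hhi
    by_cases h : c + PySem.Str.len k + 2 > M
    · have hr0 : r = 0 := by
        by_contra hne
        have h0 : (0 : Nat) < (k :: rest).length := by simp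
        have := hlo 0 h0 (Nat.pos_of_ne_zero hne)
        simp only [List.getElem_cons_zero] at this; omega
      rw [hr0, List.take_zero]
      simp only [truncA]
      rw [if_pos h]
    · have hle : c + (PySem.Str.len k + 2) ≤ M := by omega
      have hr0 : r ≠ 0 := by
        intro h0
        have := hhi 0 (by simp) (by omega)
        simp only [List.getElem_cons_zero] at this; omega
      obtain ⟨r', rfl⟩ : ∃ r', r = r' + 1 := ⟨r - 1, by omega⟩
      simp only [truncA, if_neg h, List.take_succ_cons]
      congr 1
      have e : c + PySem.Str.len k + 2 = c + (PySem.Str.len k + 2) := by ring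
      rw [e]
      refine ih (c + (PySem.Str.len k + 2)) r' (by simpa using hr) ?_ ?_
      · intro j hj hjr
        have := hlo (j + 1) (by simpa using hj) (by omega)
        simpa using this
      · intro j hj hjr
        have := hhi (j + 1) (by simpa using hj) (by omega)
        simpa using this

-- ===== VERDICT (by name: the statement is the Claim_ definition above) =====
theorem truncate_keywords_spec : Claim_equal_truncate_keywords := by
  intro keywords max_length _
  unfold Spec_truncate_keywords truncate_keywords truncate_keywords_alt
  have hpos : ∀ x ∈ keywords.map (fun k => PySem.Str.len k + 2), 0 ≤ x := by
    intro x hx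
    simp only [List.mem_map] at hx
    obtain ⟨k, _, rfl⟩ := hx
    have : 0 ≤ PySem.Str.len k := by
      simp [PySem.Str.len_eq]
    omega
  have hpw := pairwise_pyAccumulate 0 (keywords.map (fun k => PySem.Str.len k + 2)) hpos
  obtain ⟨h1, h2, h3⟩ := PySem.List.bisectRight_spec
    (pyAccumulate 0 (keywords.map (fun k => PySem.Str.len k + 2))) max_length hpw
  refine truncA_eq_take max_length keywords 0 _ ?_ ?_ ?_
  · rw [length_pyAccumulate, List.length_map] at h1; exact h1
  · intro j hj hjr
    exact h2 j (by rw [length_pyAccumulate, List.length_map]; exact hj) hjr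
  · intro j hj hjr
    exact h3 j (by rw [length_pyAccumulate, List.length_map]; exact hj) hjr
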